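-- pv_equiv track=rewrite | github.com/Nikita-quartZ/Dis-math | 2/2.1.py | calculate
-- ===== SOURCE A (Python) =====
-- def calculate(n: int, m: int, edges: list[tuple[int, int]]) -> tuple[set[bool], set[bool], set[bool]]:
--     reflex, symm, transit = set(), set(), set()
--     if n == 0:
--         pass
--     elif n < m:
--         reflex.add(False)
--         for edge in edges:
--             if edge[0] == edge[1]:
--                 reflex.add(True)
--                 symm.add(True)
--             else:
--                 if n > 2:
--                     for f_edge in edges:
--                         if edge[1] == f_edge[0] and edge[0] != f_edge[1] and f_edge[0] != f_edge[1]: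
--                             transit.add((edge[0], f_edge[1]) in edges)
--                         if transit == {True, False}:
--                             break
--                 symm.add((edge[1], edge[0]) in edges)
--
--             if reflex == symm == transit == {True, False} or n <= 2 and reflex == symm == {True, False}:
--                 break
--     elif n == m:
--         for i in range(n):
--             reflex.add((i + 1, i + 1) in edges)
--             symm.add((edges[i][1], edges[i][0]) in edges)
--             if n > 2 and edges[i][0] != edges[i][1]:
--                 for f_edge in edges:
--                     if edges[i][1] == f_edge[0] and edges[i][0] != f_edge[1] and f_edge[0] != f_edge[1]:
--                         transit.add((edges[i][0], f_edge[1]) in edges)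
--                     if transit == {True, False}:
--                         break
--             if reflex == symm == transit == {True, False} or n <= 2 and reflex == symm == {True, False}:
--                 break
--     else:
--         for i in range(1, m + 1):
--             reflex.add((i, i) in edges)
--             if reflex == {True, False}:
--                 break
--         for edge in edges:
--             symm.add((edge[1], edge[0]) in edges)
--             if n > 2 and edge[0] != edge[1]:
--                 for f_edge in edges:
--                     if edge[1] == f_edge[0] and edge[0] != f_edge[1] and f_edge[0] != f_edge[1]:
--                         transit.add((edge[0], f_edge[1]) in edges)
--                     if transit == {True, False}:
--                         break
--             if symm == transit == {True, False} or n <= 2 and symm == {True, False}: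
--                 break
--     return reflex, symm, transit
-- ===== SOURCE B (Python) =====
-- def calculate(n: int, m: int, edges: list[tuple[int, int]]) -> tuple[set[bool], set[bool], set[bool]]:
--     reflex, symm, transit = set(), set(), set()
--     if n == 0:
--         return reflex, symm, transit
--     eset = set(edges)
--     adj = {}
--     for a, b in edges:
--         adj.setdefault(a, []).append(b)
--     BOTH = {True, False}
--
--     def add_transit(a, b):
--         # successors of b that close (or fail to close) a path a -> b -> c
--         if n > 2 and a != b:
--             for c in adj.get(b, ()):
--                 if c != a and c != b:
--                     transit.add((a, c) in eset)
--
--     if n < m: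
--         reflex.add(False)
--         for a, b in edges:
--             if a == b:
--                 reflex.add(True)
--                 symm.add(True)
--             else:
--                 add_transit(a, b)
--                 symm.add((b, a) in eset)
--     elif n == m:
--         for i in range(n):
--             a, b = edges[i]
--             reflex.add((i + 1, i + 1) in eset)
--             symm.add((b, a) in eset)
--             add_transit(a, b)
--             # stop once every answer set is full; this matters when there are
--             # fewer than n edges, where continuing would index past the end
--             if reflex == BOTH and symm == BOTH and (transit == BOTH or n <= 2):
--                 break
--     else:
--         for i in range(1, m + 1):
--             reflex.add((i, i) in eset)
--         for a, b in edges: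
--             symm.add((b, a) in eset)
--             add_transit(a, b)
--     return reflex, symm, transit
-- ===== Notes on version B (the rewrite author's own statement) =====
-- stated objective: faster
-- what changed: B precomputes an edge set for O(1) membership tests and an adjacency map keyed by source vertex, so A's inner full scans over edges (for transitivity and for every '(x, y) in edges' test) disappear; only the n == m loop keeps an early stop, where it determines whether the out-of-range edges[i] indexing is reached.
import Mathlib
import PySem

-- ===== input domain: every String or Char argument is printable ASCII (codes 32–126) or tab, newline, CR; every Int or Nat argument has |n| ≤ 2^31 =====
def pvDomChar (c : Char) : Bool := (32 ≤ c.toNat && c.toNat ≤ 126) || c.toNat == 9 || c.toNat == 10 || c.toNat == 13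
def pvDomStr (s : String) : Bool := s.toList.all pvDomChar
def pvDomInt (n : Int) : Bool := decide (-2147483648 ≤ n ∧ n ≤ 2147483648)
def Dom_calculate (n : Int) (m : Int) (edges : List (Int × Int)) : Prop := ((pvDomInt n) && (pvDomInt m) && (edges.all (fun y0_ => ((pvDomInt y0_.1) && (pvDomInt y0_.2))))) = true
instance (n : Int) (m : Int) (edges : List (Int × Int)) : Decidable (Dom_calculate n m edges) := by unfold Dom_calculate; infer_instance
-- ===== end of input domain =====

-- B replaces A's per-edge list scans by a precomputed edge set and an adjacency map (the inner
-- full scan over edges disappears); B keeps an early stop only in the n == m branch, where it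
-- determines whether the edges[i] indexing is reached. Equivalence is about the RETURN value
-- (neither program mutates its arguments).

-- ===== PORT A =====
-- the Python set literal {True, False}
def tfTF : PySem.Set Bool := PySem.Set.ofList [true, false]

-- A's inner 'for f_edge in edges: …' transit loop with its 'if transit == {True, False}: break';
-- this loop appears verbatim in all three branches of A, so it is one helper here
def aInner (edges : List (Int × Int)) (e : Int × Int) : List (Int × Int) → PySem.Set Bool → PySem.Set Bool
  | [], t => t
  | f :: fs, t =>
    let t' := if e.2 == f.1 && !(e.1 == f.2) && !(f.1 == f.2)
              then PySem.Set.add t (edges.contains (e.1, f.2)) else t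
    if PySem.Set.equal t' tfTF then t' else aInner edges e fs t'

-- Python's chained 'reflex == symm == transit == {True, False}' and 'reflex == symm == {True, False}'
def aBrk3 (r s t : PySem.Set Bool) : Bool :=
  PySem.Set.equal r s && PySem.Set.equal s t && PySem.Set.equal t tfTF
def aBrk2 (r s : PySem.Set Bool) : Bool :=
  PySem.Set.equal r s && PySem.Set.equal s tfTF
-- 'reflex == symm == transit == {T,F} or n <= 2 and reflex == symm == {T,F}'
def aBrkMain (n : Int) (r s t : PySem.Set Bool) : Bool :=
  aBrk3 r s t || (decide (n ≤ 2) && aBrk2 r s)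

-- A's 'for edge in edges' loop of the n < m branch (with its break)
def aLoopLt (n : Int) (edges : List (Int × Int)) :
    List (Int × Int) → PySem.Set Bool × PySem.Set Bool × PySem.Set Bool →
    PySem.Set Bool × PySem.Set Bool × PySem.Set Bool
  | [], st => st
  | e :: es, (r, s, t) =>
    if e.1 == e.2 then
      let r' := PySem.Set.add r true
      let s' := PySem.Set.add s true
      if aBrkMain n r' s' t then (r', s', t) else aLoopLt n edges es (r', s', t)
    else
      let t' := if decide (2 < n) then aInner edges e edges t else t
      let s' := PySem.Set.add s (edges.contains (e.2, e.1))
      if aBrkMain n r s' t' then (r, s', t') else aLoopLt n edges es (r, s', t')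

-- A's 'for i in range(n)' loop of the n == m branch (with its break and edges[i] indexing)
def aLoopEq (n : Int) (edges : List (Int × Int)) :
    List Int → PySem.Set Bool × PySem.Set Bool × PySem.Set Bool →
    PySem.Set Bool × PySem.Set Bool × PySem.Set Bool
  | [], st => st
  | i :: is, (r, s, t) =>
    match PySem.List.pyGet? edges i with
    | none => (r, s, t)      -- IndexError in Python: excluded by Pre_calculate
    | some e =>
      let r' := PySem.Set.add r (edges.contains (i + 1, i + 1))
      let s' := PySem.Set.add s (edges.contains (e.2, e.1))
      let t' := if decide (2 < n) && !(e.1 == e.2) then aInner edges e edges t else t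
      if aBrkMain n r' s' t' then (r', s', t') else aLoopEq n edges is (r', s', t')

-- A's 'for i in range(1, m + 1)' reflex loop of the else branch (with its break)
def aLoopR (edges : List (Int × Int)) : List Int → PySem.Set Bool → PySem.Set Bool
  | [], r => r
  | i :: is, r =>
    let r' := PySem.Set.add r (edges.contains (i, i))
    if PySem.Set.equal r' tfTF then r' else aLoopR edges is r'

-- 'symm == transit == {T,F} or n <= 2 and symm == {T,F}'
def aBrkGt (n : Int) (s t : PySem.Set Bool) : Bool :=
  (PySem.Set.equal s t && PySem.Set.equal t tfTF) || (decide (n ≤ 2) && PySem.Set.equal s tfTF)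

-- A's 'for edge in edges' loop of the else branch (with its break)
def aLoopGt (n : Int) (edges : List (Int × Int)) :
    List (Int × Int) → PySem.Set Bool × PySem.Set Bool → PySem.Set Bool × PySem.Set Bool
  | [], st => st
  | e :: es, (s, t) =>
    let s' := PySem.Set.add s (edges.contains (e.2, e.1))
    let t' := if decide (2 < n) && !(e.1 == e.2) then aInner edges e edges t else t
    if aBrkGt n s' t' then (s', t') else aLoopGt n edges es (s', t')

def calculate (n : Int) (m : Int) (edges : List (Int × Int)) : List Bool × List Bool × List Bool :=
  if n == 0 then (PySem.Set.empty, PySem.Set.empty, PySem.Set.empty)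
  else if n < m then
    aLoopLt n edges edges (PySem.Set.add PySem.Set.empty false, PySem.Set.empty, PySem.Set.empty)
  else if n == m then
    aLoopEq n edges (PySem.List.pyRange 0 n 1) (PySem.Set.empty, PySem.Set.empty, PySem.Set.empty)
  else
    let r := aLoopR edges (PySem.List.pyRange 1 (m + 1) 1) PySem.Set.empty
    let st := aLoopGt n edges edges (PySem.Set.empty, PySem.Set.empty)
    (r, st.1, st.2)

-- ===== PORT B =====
-- B's BOTH = {True, False} is the same set literal tfTF defined above

-- adj = {}; for a, b in edges: adj.setdefault(a, []).append(b)
def bAdj (edges : List (Int × Int)) : PySem.Dict Int (List Int) :=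
  edges.foldl (fun d e => d.insert e.1 (d.getD e.1 [] ++ [e.2])) PySem.Dict.empty

-- add_transit: walk only the successors adj[b] of b, membership test against the edge set
def bTrans (n : Int) (eset : PySem.Set (Int × Int)) (adj : PySem.Dict Int (List Int))
    (e : Int × Int) (t : PySem.Set Bool) : PySem.Set Bool :=
  if decide (2 < n) && !(e.1 == e.2) then
    (adj.getD e.2 []).foldl
      (fun t c => if !(c == e.1) && !(c == e.2)
                  then PySem.Set.add t (eset.contains (e.1, c)) else t) t
  else t

-- B's 'for i in range(n)' loop of the n == m branch, with its early stop
-- 'if reflex == BOTH and symm == BOTH and (transit == BOTH or n <= 2): break'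
def bLoopEq (n : Int) (eset : PySem.Set (Int × Int)) (adj : PySem.Dict Int (List Int))
    (edges : List (Int × Int)) :
    List Int → PySem.Set Bool × PySem.Set Bool × PySem.Set Bool →
    PySem.Set Bool × PySem.Set Bool × PySem.Set Bool
  | [], st => st
  | i :: is, (r, s, t) =>
    match PySem.List.pyGet? edges i with
    | none => (r, s, t)      -- IndexError in Python: excluded by Pre_calculate
    | some e =>
      let r' := PySem.Set.add r (eset.contains (i + 1, i + 1))
      let s' := PySem.Set.add s (eset.contains (e.2, e.1))
      let t' := bTrans n eset adj e t
      if PySem.Set.equal r' tfTF && PySem.Set.equal s' tfTF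
          && (PySem.Set.equal t' tfTF || decide (n ≤ 2))
      then (r', s', t') else bLoopEq n eset adj edges is (r', s', t')

def calculate_alt (n : Int) (m : Int) (edges : List (Int × Int)) : List Bool × List Bool × List Bool :=
  if n == 0 then (PySem.Set.empty, PySem.Set.empty, PySem.Set.empty)
  else
    let eset := PySem.Set.ofList edges
    let adj := bAdj edges
    if n < m then
      edges.foldl
        (fun st e =>
          if e.1 == e.2 then (PySem.Set.add st.1 true, PySem.Set.add st.2.1 true, st.2.2)
          else (st.1, PySem.Set.add st.2.1 (eset.contains (e.2, e.1)), bTrans n eset adj e st.2.2))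
        (PySem.Set.add PySem.Set.empty false, PySem.Set.empty, PySem.Set.empty)
    else if n == m then
      bLoopEq n eset adj edges (PySem.List.pyRange 0 n 1)
        (PySem.Set.empty, PySem.Set.empty, PySem.Set.empty)
    else
      let r := (PySem.List.pyRange 1 (m + 1) 1).foldl
        (fun r i => PySem.Set.add r (eset.contains (i, i))) PySem.Set.empty
      let st := edges.foldl
        (fun st e =>
          (PySem.Set.add st.1 (eset.contains (e.2, e.1)), bTrans n eset adj e st.2))
        (PySem.Set.empty, PySem.Set.empty)
      (r, st.1, st.2)

-- ===== PRECONDITION & SPEC =====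
-- Pre_ excludes n == m with fewer than n edges: there the edges[i] indexing raises IndexError in
-- both programs unless the early stop fires first, and whether it fires is not a closed-form
-- condition on the input, so the whole (thin) slice is excluded; on the rare excluded inputs
-- where the early stop does let A return, B returns the very same value.
def Pre_calculate (n : Int) (m : Int) (edges : List (Int × Int)) : Prop :=
  ¬ (n = m ∧ 0 < n ∧ (edges.length : Int) < n)
instance (n : Int) (m : Int) (edges : List (Int × Int)) : Decidable (Pre_calculate n m edges) := by
  unfold Pre_calculate; infer_instance
def pvWitness_calculate : Int × Int × (List (Int × Int)) := (3, 3, [(1, 2), (2, 3), (1, 1)])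

def Spec_calculate (n : Int) (m : Int) (edges : List (Int × Int)) (out : List Bool × List Bool × List Bool) : Prop := out = calculate_alt n m edges
instance (n : Int) (m : Int) (edges : List (Int × Int)) (out : List Bool × List Bool × List Bool) : Decidable (Spec_calculate n m edges out) := by unfold Spec_calculate; infer_instance

-- ===== CLAIM (what is proved, stated in full; the proofs are below) =====
def Claim_equal_calculate : Prop := ∀ (n : Int) (m : Int) (edges : List (Int × Int)), Dom_calculate n m edges → Pre_calculate n m edges → Spec_calculate n m edges (calculate n m edges)

-- ===== LEMMAS AND PROOFS =====

-- every Bool is an element of the set literal {True, False}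
theorem mem_tfTF (b : Bool) : b ∈ tfTF := by cases b <;> decide

-- Python's set equality with {True, False} means: both booleans are members
theorem equal_tfTF_iff (t : PySem.Set Bool) :
    PySem.Set.equal t tfTF = true ↔ (true ∈ t ∧ false ∈ t) := by
  rw [PySem.Set.equal_iff]
  constructor
  · intro h; exact ⟨(h true).mpr (mem_tfTF true), (h false).mpr (mem_tfTF false)⟩
  · intro ⟨h1, h2⟩ x; cases x <;> simp [h1, h2, mem_tfTF]

-- equality of two Bool sets is decided by the membership of true and of false
theorem equal_bool_iff (a b : PySem.Set Bool) :
    PySem.Set.equal a b = true ↔ ((true ∈ a ↔ true ∈ b) ∧ (false ∈ a ↔ false ∈ b)) := by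
  rw [PySem.Set.equal_iff]
  constructor
  · intro h; exact ⟨h true, h false⟩
  · intro ⟨h1, h2⟩ x; cases x
    · exact h2
    · exact h1

-- two full Bool sets are equal
theorem equal_of_full {a b : PySem.Set Bool} (ha : true ∈ a ∧ false ∈ a)
    (hb : true ∈ b ∧ false ∈ b) : PySem.Set.equal a b = true :=
  (equal_bool_iff a b).mpr ⟨⟨fun _ => hb.1, fun _ => ha.1⟩, ⟨fun _ => hb.2, fun _ => ha.2⟩⟩

-- the break condition of the n < m and n == m branches yields full sets
theorem brkMain_cases {n : Int} {r s t : PySem.Set Bool} (h : aBrkMain n r s t = true) :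
    ((true ∈ r ∧ false ∈ r) ∧ (true ∈ s ∧ false ∈ s) ∧ (true ∈ t ∧ false ∈ t)) ∨
    (n ≤ 2 ∧ (true ∈ r ∧ false ∈ r) ∧ (true ∈ s ∧ false ∈ s)) := by
  unfold aBrkMain aBrk3 aBrk2 at h
  simp only [Bool.or_eq_true, Bool.and_eq_true, decide_eq_true_eq] at h
  rcases h with ⟨⟨hrs, hst⟩, htf⟩ | ⟨hn, hrs, hsf⟩
  · have ht := (equal_tfTF_iff t).mp htf
    have hs : true ∈ s ∧ false ∈ s :=
      ⟨((PySem.Set.equal_iff _ _).mp hst true).mpr ht.1, ((PySem.Set.equal_iff _ _).mp hst false).mpr ht.2⟩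
    exact Or.inl ⟨⟨((PySem.Set.equal_iff _ _).mp hrs true).mpr hs.1,
      ((PySem.Set.equal_iff _ _).mp hrs false).mpr hs.2⟩, hs, ht⟩
  · have hs := (equal_tfTF_iff s).mp hsf
    exact Or.inr ⟨hn, ⟨((PySem.Set.equal_iff _ _).mp hrs true).mpr hs.1,
      ((PySem.Set.equal_iff _ _).mp hrs false).mpr hs.2⟩, hs⟩

-- A's chained break condition equals B's conjunctive one
theorem brk_eq (n : Int) (r s t : PySem.Set Bool) :
    aBrkMain n r s t =
      (PySem.Set.equal r tfTF && PySem.Set.equal s tfTF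
        && (PySem.Set.equal t tfTF || decide (n ≤ 2))) := by
  rw [Bool.eq_iff_iff]
  simp only [Bool.and_eq_true, Bool.or_eq_true, decide_eq_true_eq]
  constructor
  · intro h
    rcases brkMain_cases h with ⟨hr, hs, ht⟩ | ⟨hn, hr, hs⟩
    · exact ⟨⟨(equal_tfTF_iff r).mpr hr, (equal_tfTF_iff s).mpr hs⟩,
        Or.inl ((equal_tfTF_iff t).mpr ht)⟩
    · exact ⟨⟨(equal_tfTF_iff r).mpr hr, (equal_tfTF_iff s).mpr hs⟩, Or.inr hn⟩
  · rintro ⟨⟨hr, hs⟩, hto⟩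
    have hr' := (equal_tfTF_iff r).mp hr
    have hs' := (equal_tfTF_iff s).mp hs
    unfold aBrkMain aBrk3 aBrk2
    simp only [Bool.or_eq_true, Bool.and_eq_true, decide_eq_true_eq]
    rcases hto with ht | hn
    · exact Or.inl ⟨⟨equal_of_full hr' hs', equal_of_full hs' ((equal_tfTF_iff t).mp ht)⟩, ht⟩
    · exact Or.inr ⟨hn, equal_of_full hr' hs', hs⟩

-- adding to a set that already holds both booleans does nothing
theorem add_full {t : PySem.Set Bool} (h : true ∈ t ∧ false ∈ t) (b : Bool) :
    PySem.Set.add t b = t := by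
  cases b
  · exact PySem.Set.add_of_mem h.2
  · exact PySem.Set.add_of_mem h.1

-- a guarded add-fold over a full set is the identity
theorem foldl_add_full {α : Type} (g : α → Bool) (f : α → Bool) (l : List α)
    {t : PySem.Set Bool} (h : true ∈ t ∧ false ∈ t) :
    l.foldl (fun t c => if g c then PySem.Set.add t (f c) else t) t = t := by
  induction l with
  | nil => rfl
  | cons c cs ih => simpa [add_full h] using ih

-- break elimination for the inner loop
theorem aInner_eq_foldl (edges : List (Int × Int)) (e : Int × Int) (fs : List (Int × Int))
    (t : PySem.Set Bool) :
    aInner edges e fs t =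
      fs.foldl (fun t f => if e.2 == f.1 && !(e.1 == f.2) && !(f.1 == f.2)
                           then PySem.Set.add t (edges.contains (e.1, f.2)) else t) t := by
  induction fs generalizing t with
  | nil => rfl
  | cons f fs ih =>
    simp only [aInner, List.foldl_cons]
    set t' := if e.2 == f.1 && !(e.1 == f.2) && !(f.1 == f.2)
              then PySem.Set.add t (edges.contains (e.1, f.2)) else t with ht'
    by_cases hfull : PySem.Set.equal t' tfTF = true
    · rw [if_pos hfull, foldl_add_full _ _ _ ((equal_tfTF_iff t').mp hfull)]
    · rw [if_neg hfull, ih]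

-- set(edges) membership is list membership
theorem eset_contains (l : List (Int × Int)) (x : Int × Int) :
    (PySem.Set.ofList l).contains x = l.contains x := by
  simp [pysem]

-- the adjacency-building fold, generalized over the starting dict
theorem bAdj_getD_gen (edges : List (Int × Int)) (x : Int) :
    ∀ d : PySem.Dict Int (List Int),
      (edges.foldl (fun d e => d.insert e.1 (d.getD e.1 [] ++ [e.2])) d).getD x []
        = d.getD x [] ++ (edges.filter (fun f => f.1 == x)).map (·.2) := by
  induction edges with
  | nil => intro d; simp
  | cons e es ih =>
    intro d
    simp only [List.foldl_cons, List.filter_cons]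
    rw [ih]
    by_cases h : e.1 = x
    · simp [h]
    · simp [PySem.Dict.getD_insert, h, Ne.symm h]

-- the adjacency dict groups the second components by first component, in order
theorem bAdj_getD (edges : List (Int × Int)) (x : Int) :
    (bAdj edges).getD x [] = (edges.filter (fun f => f.1 == x)).map (·.2) := by
  simpa using bAdj_getD_gen edges x PySem.Dict.empty

-- A's inner transit loop equals B's adjacency-list fold
theorem inner_eq_bTrans (n : Int) (edges : List (Int × Int)) (e : Int × Int)
    (t : PySem.Set Bool) :
    (if decide (2 < n) && !(e.1 == e.2) then aInner edges e edges t else t) =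
      bTrans n (PySem.Set.ofList edges) (bAdj edges) e t := by
  unfold bTrans
  by_cases hg : (decide (2 < n) && !(e.1 == e.2)) = true
  · rw [if_pos hg, if_pos hg, aInner_eq_foldl, bAdj_getD, List.foldl_map, List.foldl_filter]
    congr 1
    funext t f
    simp only [eset_contains]
    have hc : (e.2 == f.1 && !(e.1 == f.2) && !(f.1 == f.2))
        = (f.1 == e.2 && (!(f.2 == e.1) && !(f.2 == e.2))) := by
      rw [Bool.eq_iff_iff]
      simp only [Bool.and_eq_true, Bool.not_eq_true', beq_iff_eq, beq_eq_false_iff_ne]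
      omega
    rw [hc]
    cases hA : (f.1 == e.2)
    · simp [hA]
    · simp
  · rw [if_neg hg, if_neg hg]

-- an unguarded add-fold over a full set is the identity
theorem foldl_add_full' {α : Type} (f : α → Bool) (l : List α)
    {t : PySem.Set Bool} (h : true ∈ t ∧ false ∈ t) :
    l.foldl (fun t c => PySem.Set.add t (f c)) t = t := by
  induction l with
  | nil => rfl
  | cons c cs ih => simpa [add_full h] using ih

-- bTrans on a full transit set is the identity
theorem bTrans_full (n : Int) (eset : PySem.Set (Int × Int)) (adj : PySem.Dict Int (List Int))
    (e : Int × Int) {t : PySem.Set Bool} (h : true ∈ t ∧ false ∈ t) :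
    bTrans n eset adj e t = t := by
  unfold bTrans
  split
  · exact foldl_add_full _ _ _ h
  · rfl

-- bTrans does nothing when n ≤ 2
theorem bTrans_of_le {n : Int} (hn : n ≤ 2) (eset : PySem.Set (Int × Int))
    (adj : PySem.Dict Int (List Int)) (e : Int × Int) (t : PySem.Set Bool) :
    bTrans n eset adj e t = t := by
  unfold bTrans
  have : ¬ (2:Int) < n := by omega
  simp [this]

theorem brkGt_cases {n : Int} {s t : PySem.Set Bool} (h : aBrkGt n s t = true) :
    ((true ∈ s ∧ false ∈ s) ∧ (true ∈ t ∧ false ∈ t)) ∨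
    (n ≤ 2 ∧ (true ∈ s ∧ false ∈ s)) := by
  unfold aBrkGt at h
  simp only [Bool.or_eq_true, Bool.and_eq_true, decide_eq_true_eq] at h
  rcases h with ⟨hst, htf⟩ | ⟨hn, hsf⟩
  · have ht := (equal_tfTF_iff t).mp htf
    exact Or.inl ⟨⟨((PySem.Set.equal_iff _ _).mp hst true).mpr ht.1,
      ((PySem.Set.equal_iff _ _).mp hst false).mpr ht.2⟩, ht⟩
  · exact Or.inr ⟨hn, (equal_tfTF_iff s).mp hsf⟩

-- once A's break condition holds, B's remaining n < m iterations change nothing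
theorem foldlLt_absorb (n : Int) (edges : List (Int × Int)) (es : List (Int × Int))
    {st : PySem.Set Bool × PySem.Set Bool × PySem.Set Bool}
    (h : aBrkMain n st.1 st.2.1 st.2.2 = true) :
    es.foldl
      (fun st e =>
        if e.1 == e.2 then (PySem.Set.add st.1 true, PySem.Set.add st.2.1 true, st.2.2)
        else (st.1, PySem.Set.add st.2.1 ((PySem.Set.ofList edges).contains (e.2, e.1)),
              bTrans n (PySem.Set.ofList edges) (bAdj edges) e st.2.2)) st = st := by
  induction es with
  | nil => rfl
  | cons e es ih =>
    rw [List.foldl_cons]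
    obtain ⟨r, s, t⟩ := st
    have hstep : (if e.1 == e.2 then (PySem.Set.add r true, PySem.Set.add s true, t)
        else (r, PySem.Set.add s ((PySem.Set.ofList edges).contains (e.2, e.1)),
              bTrans n (PySem.Set.ofList edges) (bAdj edges) e t))
        = (r, s, t) := by
      rcases brkMain_cases h with ⟨hr, hs, ht⟩ | ⟨hn, hr, hs⟩
      · cases hd : (e.1 == e.2) <;>
          simp [hd, add_full hr, add_full hs, bTrans_full _ _ _ _ ht]
      · cases hd : (e.1 == e.2) <;>
          simp [hd, add_full hr, add_full hs, bTrans_of_le hn]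
    rw [hstep]
    exact ih

theorem loopLt_eq (n : Int) (edges : List (Int × Int)) (es : List (Int × Int))
    (st : PySem.Set Bool × PySem.Set Bool × PySem.Set Bool) :
    aLoopLt n edges es st =
      es.foldl
        (fun st e =>
          if e.1 == e.2 then (PySem.Set.add st.1 true, PySem.Set.add st.2.1 true, st.2.2)
          else (st.1, PySem.Set.add st.2.1 ((PySem.Set.ofList edges).contains (e.2, e.1)),
                bTrans n (PySem.Set.ofList edges) (bAdj edges) e st.2.2)) st := by
  induction es generalizing st with
  | nil => rfl
  | cons e es ih =>
    obtain ⟨r, s, t⟩ := st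
    rw [List.foldl_cons]
    by_cases hd : (e.1 == e.2) = true
    · show (if e.1 == e.2 then _ else _) = _
      rw [if_pos hd]
      simp only [hd, if_true]
      by_cases hb : aBrkMain n (PySem.Set.add r true) (PySem.Set.add s true) t = true
      · rw [if_pos hb, foldlLt_absorb n edges es hb]
      · rw [if_neg hb, ih]
    · show (if e.1 == e.2 then _ else _) = _
      rw [if_neg hd]
      have hb' : (e.1 == e.2) = false := by simpa using hd
      simp only [hb', Bool.false_eq_true, if_false]
      have htr : (if decide (2 < n) then aInner edges e edges t else t)
          = bTrans n (PySem.Set.ofList edges) (bAdj edges) e t := by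
        rw [← inner_eq_bTrans n edges e t, hb']
        simp
      rw [htr, ← eset_contains]
      by_cases hb : aBrkMain n r (PySem.Set.add s ((PySem.Set.ofList edges).contains (e.2, e.1)))
          (bTrans n (PySem.Set.ofList edges) (bAdj edges) e t) = true
      · rw [if_pos hb, foldlLt_absorb n edges es hb]
      · rw [if_neg hb, ih]

-- A's n == m loop equals B's: same steps (through the set and the adjacency map) and,
-- by brk_eq, the same break condition
theorem loopEq_eq (n : Int) (edges : List (Int × Int)) (is : List Int)
    (st : PySem.Set Bool × PySem.Set Bool × PySem.Set Bool) :
    aLoopEq n edges is st =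
      bLoopEq n (PySem.Set.ofList edges) (bAdj edges) edges is st := by
  induction is generalizing st with
  | nil => rfl
  | cons i is ih =>
    obtain ⟨r, s, t⟩ := st
    show (match PySem.List.pyGet? edges i with
          | none => (r, s, t)
          | some e => _) =
         (match PySem.List.pyGet? edges i with
          | none => (r, s, t)
          | some e => _)
    cases hpg : PySem.List.pyGet? edges i with
    | none => rfl
    | some e =>
      simp only [inner_eq_bTrans, eset_contains, brk_eq]
      split_ifs with hbk
      · rfl
      · exact ih _

theorem loopR_eq (edges : List (Int × Int)) (is : List Int) (r : PySem.Set Bool) :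
    aLoopR edges is r =
      is.foldl (fun r i => PySem.Set.add r ((PySem.Set.ofList edges).contains (i, i))) r := by
  induction is generalizing r with
  | nil => rfl
  | cons i is ih =>
    rw [List.foldl_cons]
    show (let r' := PySem.Set.add r (edges.contains (i, i));
          if PySem.Set.equal r' tfTF then r' else aLoopR edges is r') = _
    rw [← eset_contains]
    by_cases hf : PySem.Set.equal (PySem.Set.add r ((PySem.Set.ofList edges).contains (i, i))) tfTF = true
    · simp only [hf, if_true]
      exact (foldl_add_full' _ is ((equal_tfTF_iff _).mp hf)).symm
    · simp only [hf, Bool.false_eq_true, if_false]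
      exact ih _

-- once A's break condition holds, B's remaining else-branch iterations change nothing
theorem foldlGt_absorb (n : Int) (edges : List (Int × Int)) (es : List (Int × Int))
    {st : PySem.Set Bool × PySem.Set Bool}
    (h : aBrkGt n st.1 st.2 = true) :
    es.foldl
      (fun st e =>
        (PySem.Set.add st.1 ((PySem.Set.ofList edges).contains (e.2, e.1)),
         bTrans n (PySem.Set.ofList edges) (bAdj edges) e st.2)) st = st := by
  induction es with
  | nil => rfl
  | cons e es ih =>
    rw [List.foldl_cons]
    obtain ⟨s, t⟩ := st
    have hstep : (PySem.Set.add s ((PySem.Set.ofList edges).contains (e.2, e.1)),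
        bTrans n (PySem.Set.ofList edges) (bAdj edges) e t) = (s, t) := by
      rcases brkGt_cases h with ⟨hs, ht⟩ | ⟨hn, hs⟩
      · simp [add_full hs, bTrans_full _ _ _ _ ht]
      · simp [add_full hs, bTrans_of_le hn]
    rw [hstep]
    exact ih

theorem loopGt_eq (n : Int) (edges : List (Int × Int)) (es : List (Int × Int))
    (st : PySem.Set Bool × PySem.Set Bool) :
    aLoopGt n edges es st =
      es.foldl
        (fun st e =>
          (PySem.Set.add st.1 ((PySem.Set.ofList edges).contains (e.2, e.1)),
           bTrans n (PySem.Set.ofList edges) (bAdj edges) e st.2)) st := by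
  induction es generalizing st with
  | nil => rfl
  | cons e es ih =>
    obtain ⟨s, t⟩ := st
    rw [List.foldl_cons]
    show (let s' := PySem.Set.add s (edges.contains (e.2, e.1));
          let t' := if decide (2 < n) && !(e.1 == e.2) then aInner edges e edges t else t;
          if aBrkGt n s' t' then (s', t') else aLoopGt n edges es (s', t')) = _
    rw [← inner_eq_bTrans n edges e t, ← eset_contains]
    by_cases hb : aBrkGt n (PySem.Set.add s ((PySem.Set.ofList edges).contains (e.2, e.1)))
        (if decide (2 < n) && !(e.1 == e.2) then aInner edges e edges t else t) = true
    · simp only [hb, if_true]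
      rw [inner_eq_bTrans n edges e t] at hb ⊢
      exact (foldlGt_absorb n edges es hb).symm
    · simp only [hb, Bool.false_eq_true, if_false]
      rw [inner_eq_bTrans n edges e t]
      exact ih _

-- ===== VERDICT (by name: the statement is the Claim_ definition above) =====
theorem calculate_spec : Claim_equal_calculate := by
  unfold Claim_equal_calculate
  intro n m edges _hdom _hpre
  unfold Spec_calculate calculate calculate_alt
  by_cases h0 : (n == 0) = true
  · simp only [h0, if_true]
  · simp only [h0, Bool.false_eq_true, if_false]
    by_cases hlt : n < m
    · simp only [hlt, if_true]
      exact loopLt_eq n edges edges _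
    · simp only [hlt, if_false]
      by_cases heq : (n == m) = true
      · simp only [heq, if_true]
        exact loopEq_eq n edges _ _
      · simp only [heq, Bool.false_eq_true, if_false]
        rw [loopR_eq, loopGt_eq]
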